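-- pv_equiv track=rewrite | github.com/for13to1/sample_code | ty_lib/test_pattern_generator2.py | calc_l_for_block
-- ===== SOURCE A (Python) =====
-- def calc_thickness_for_block(block_idx, num_of_block):
--     bb = block_idx
--     thickness = 2 ** (num_of_block - 1 - bb)
--
--     return thickness
--
-- def calc_l_for_block(block_idx, num_of_block, num_of_line):
--     bb = block_idx
--     thickness = calc_thickness_for_block(block_idx, num_of_block)
--
--     if bb >= (num_of_block - 1):
--         ll = thickness * num_of_line * 2 * 2 - 1
--     else:
--         ll = thickness * num_of_line * 2 * 2\
--             + calc_l_for_block(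
--                 block_idx=bb+1, num_of_block=num_of_block,
--                 num_of_line=num_of_line)
--
--     return ll
-- ===== SOURCE B (Python) =====
-- def calc_l_for_block(block_idx, num_of_block, num_of_line):
--     # closed form of the geometric sum the recursion computes:
--     # sum_{b=block_idx}^{num_of_block-1} 4*num_of_line*2**(num_of_block-1-b)  minus 1
--     return 4 * num_of_line * (2 ** (num_of_block - block_idx) - 1) - 1
-- ===== Notes on version B (the rewrite author's own statement) =====
-- stated objective: faster
-- what changed: Replaced the O(num_of_block - block_idx) recursion with the closed-form geometric sum 4*num_of_line*(2^(num_of_block-block_idx)-1) - 1, computed in O(1) arithmetic operations.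
-- outside the precondition, e.g. on calc_l_for_block(3, 3, 2): A returns 3.0, B returns -1; on calc_l_for_block(5, 3, 2): A returns 0.0, B returns -7.0
import Mathlib
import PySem

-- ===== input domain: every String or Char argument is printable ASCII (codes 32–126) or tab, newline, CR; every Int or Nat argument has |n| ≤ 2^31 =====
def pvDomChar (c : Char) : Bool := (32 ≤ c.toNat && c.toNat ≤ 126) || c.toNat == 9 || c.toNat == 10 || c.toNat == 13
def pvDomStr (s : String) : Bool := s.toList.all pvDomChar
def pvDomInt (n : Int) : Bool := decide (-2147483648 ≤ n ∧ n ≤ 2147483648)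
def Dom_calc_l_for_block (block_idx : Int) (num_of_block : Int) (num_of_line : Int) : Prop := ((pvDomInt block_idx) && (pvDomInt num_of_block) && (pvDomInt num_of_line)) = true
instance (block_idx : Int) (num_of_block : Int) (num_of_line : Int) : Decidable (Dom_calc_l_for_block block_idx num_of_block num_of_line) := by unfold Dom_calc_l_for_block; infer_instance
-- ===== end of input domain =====

-- B replaces A's linear recursion by the closed-form geometric sum (O(1)); proved equal on Pre_.


-- ===== PORT A =====
-- Python's 2 ** e is an int only for e ≥ 0 (it is a float for e < 0); on Pre_ every
-- exponent reached is ≥ 0, so `.toNat` on the exponent is exact there.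
def calc_thickness_for_block (block_idx : Int) (num_of_block : Int) : Int :=
  let bb := block_idx
  let thickness : Int := 2 ^ (num_of_block - 1 - bb).toNat
  thickness

def calc_l_for_block (block_idx : Int) (num_of_block : Int) (num_of_line : Int) : Int :=
  let bb := block_idx
  let thickness := calc_thickness_for_block block_idx num_of_block
  if bb ≥ num_of_block - 1 then
    thickness * num_of_line * 2 * 2 - 1
  else
    thickness * num_of_line * 2 * 2 +
      calc_l_for_block (bb + 1) num_of_block num_of_line
termination_by (num_of_block - block_idx).toNat
decreasing_by omega

-- ===== PORT B =====
def calc_l_for_block_alt (block_idx : Int) (num_of_block : Int) (num_of_line : Int) : Int :=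
  4 * num_of_line * (2 ^ (num_of_block - block_idx).toNat - 1) - 1

-- ===== PRECONDITION & SPEC =====
-- Pre_ excludes block_idx > num_of_block - 1, where Python A returns a float (not an int),
-- and recursion depth num_of_block - block_idx > 900, where Python A raises RecursionError.
def Pre_calc_l_for_block (block_idx : Int) (num_of_block : Int) (num_of_line : Int) : Prop :=
  block_idx ≤ num_of_block - 1 ∧ num_of_block - block_idx ≤ 900
instance (block_idx : Int) (num_of_block : Int) (num_of_line : Int) : Decidable (Pre_calc_l_for_block block_idx num_of_block num_of_line) := by unfold Pre_calc_l_for_block; infer_instance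

def pvWitness_calc_l_for_block : Int × Int × Int := (0, 3, 2)

def Spec_calc_l_for_block (block_idx : Int) (num_of_block : Int) (num_of_line : Int) (out : Int) : Prop := out = calc_l_for_block_alt block_idx num_of_block num_of_line
instance (block_idx : Int) (num_of_block : Int) (num_of_line : Int) (out : Int) : Decidable (Spec_calc_l_for_block block_idx num_of_block num_of_line out) := by unfold Spec_calc_l_for_block; infer_instance

-- ===== CLAIM (what is proved, stated in full; the proofs are below) =====
def Claim_equal_calc_l_for_block : Prop := ∀ (block_idx : Int) (num_of_block : Int) (num_of_line : Int), Dom_calc_l_for_block block_idx num_of_block num_of_line → Pre_calc_l_for_block block_idx num_of_block num_of_line → Spec_calc_l_for_block block_idx num_of_block num_of_line (calc_l_for_block block_idx num_of_block num_of_line)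

-- ===== LEMMAS AND PROOFS =====

-- closed form of A's recursion, by induction on the gap num_of_block - 1 - block_idx
lemma calc_l_for_block_closed (k : Nat) : ∀ (b N L : Int), N - 1 - b = (k : Int) →
    calc_l_for_block b N L = 4 * L * (2 ^ (N - b).toNat - 1) - 1 := by
  induction k with
  | zero =>
    intro b N L h
    rw [calc_l_for_block]
    have hb : b ≥ N - 1 := by omega
    simp only [calc_thickness_for_block, if_pos hb]
    have h1 : (N - 1 - b).toNat = 0 := by omega
    have h2 : (N - b).toNat = 1 := by omega
    rw [h1, h2]; ring
  | succ k ih =>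
    intro b N L h
    rw [calc_l_for_block]
    have hb : ¬ (b ≥ N - 1) := by omega
    simp only [calc_thickness_for_block, if_neg hb]
    rw [ih (b + 1) N L (by omega)]
    have h1 : (N - 1 - b).toNat = k + 1 := by omega
    have h2 : (N - (b + 1)).toNat = k + 1 := by omega
    have h3 : (N - b).toNat = k + 2 := by omega
    rw [h1, h2, h3, pow_succ (2 : Int) (k + 1)]
    ring

-- ===== VERDICT (by name: the statement is the Claim_ definition above) =====
theorem calc_l_for_block_spec : Claim_equal_calc_l_for_block := by
  intro b N L _ hpre
  obtain ⟨h1, h2⟩ := hpre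
  unfold Spec_calc_l_for_block calc_l_for_block_alt
  exact calc_l_for_block_closed (N - 1 - b).toNat b N L (by omega)
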